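-- pv_equiv track=rewrite | github.com/navilez504/ReportingSaas | backend/app/services/tabular.py | collapse_us_thousands_groups
-- ===== SOURCE A (Python) =====
-- def collapse_us_thousands_groups(parts: list[str]) -> list[str]:
--     """
--     Merge adjacent all-digit tokens where each chunk after the first has length 3
--     (US-style thousands: 4 + 200 -> 4200; 1 + 234 + 567 -> 1234567).
--     Does not merge when the next token is not exactly 3 digits (avoids dates / EU decimals).
--     """
--     if not parts:
--         return parts
--     out: list[str] = []
--     i = 0
--     while i < len(parts):
--         p = parts[i]
--         if not p.isdigit():
--             out.append(p)
--             i += 1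
--             continue
--         acc = p
--         i += 1
--         while i < len(parts):
--             nxt = parts[i]
--             if nxt.isdigit() and len(nxt) == 3:
--                 acc += nxt
--                 i += 1
--             else:
--                 break
--         out.append(acc)
--     return out
-- ===== SOURCE B (Python) =====
-- def collapse_us_thousands_groups(parts: list[str]) -> list[str]:
--     """Single flat pass: a boolean flag tracks whether out[-1] is an active
--     digit run that can still absorb 3-digit tokens."""
--     out: list[str] = []
--     in_group = False
--     for p in parts:
--         if p.isdigit() and in_group and len(p) == 3:
--             out[-1] += p
--         elif p.isdigit():
--             out.append(p)
--             in_group = True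
--         else:
--             out.append(p)
--             in_group = False
--     return out
-- ===== Notes on version B (the rewrite author's own statement) =====
-- stated objective: simpler
-- what changed: Replaces A's nested while-loops with index bookkeeping by one flat for-loop over the tokens that keeps a single boolean flag ('out[-1] is an active digit run') and extends out[-1] in place.
import Mathlib
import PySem

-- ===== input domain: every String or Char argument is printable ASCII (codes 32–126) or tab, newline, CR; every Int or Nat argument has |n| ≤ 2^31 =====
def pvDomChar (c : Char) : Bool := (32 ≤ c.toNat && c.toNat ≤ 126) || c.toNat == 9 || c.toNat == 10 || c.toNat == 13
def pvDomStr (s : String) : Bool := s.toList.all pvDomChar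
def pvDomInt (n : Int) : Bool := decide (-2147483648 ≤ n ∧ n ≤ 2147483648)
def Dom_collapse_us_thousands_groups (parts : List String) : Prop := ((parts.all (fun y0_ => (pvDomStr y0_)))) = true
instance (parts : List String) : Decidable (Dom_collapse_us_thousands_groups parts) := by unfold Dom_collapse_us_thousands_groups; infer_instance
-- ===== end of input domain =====

-- B replaces A's nested while-loops (outer scan + inner absorbing scan with index bookkeeping)
-- by one flat pass keeping a boolean flag "out[-1] is an active digit run"; objective: simpler.


-- ===== PORT A =====
-- inner while: absorb following 3-digit tokens into acc, return (acc, remaining parts)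
def pvInnerA (acc : String) (rest : List String) : String × List String :=
  match rest with
  | [] => (acc, [])
  | nxt :: tl =>
    if PySem.Str.strIsdigit nxt && (PySem.Str.len nxt == 3) then pvInnerA (acc ++ nxt) tl
    else (acc, nxt :: tl)

-- cited by pvLoopA's decreasing_by
lemma pvInnerA_len : ∀ (rest : List String) (acc : String), (pvInnerA acc rest).2.length ≤ rest.length := by
  intro rest
  induction rest with
  | nil => intro acc; simp [pvInnerA]
  | cons nxt tl ih =>
    intro acc
    simp only [pvInnerA]
    split
    · exact Nat.le_trans (ih _) (Nat.le_succ _)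
    · simp

-- outer while over the remaining suffix of parts
def pvLoopA (l : List String) : List String :=
  match l with
  | [] => []
  | p :: tl =>
    if !PySem.Str.strIsdigit p then p :: pvLoopA tl
    else
      let r := pvInnerA p tl
      r.1 :: pvLoopA r.2
termination_by l.length
decreasing_by
  · simp
  · have := pvInnerA_len tl p
    simp only [List.length_cons]
    omega

def collapse_us_thousands_groups (parts : List String) : List String :=
  if parts = [] then parts else pvLoopA parts

-- ===== PORT B =====
-- one step of B's flat for-loop; state = (out, in_group)
def pvStepB (st : List String × Bool) (p : String) : List String × Bool :=
  if PySem.Str.strIsdigit p && st.2 && (PySem.Str.len p == 3) then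
    (st.1.dropLast ++ [st.1.getLastD "" ++ p], st.2)   -- out[-1] += p
  else if PySem.Str.strIsdigit p then (st.1 ++ [p], true)
  else (st.1 ++ [p], false)

def collapse_us_thousands_groups_alt (parts : List String) : List String :=
  (parts.foldl pvStepB ([], false)).1

-- ===== PRECONDITION & SPEC =====
def Spec_collapse_us_thousands_groups (parts : List String) (out : List String) : Prop := out = collapse_us_thousands_groups_alt parts
instance (parts : List String) (out : List String) : Decidable (Spec_collapse_us_thousands_groups parts out) := by unfold Spec_collapse_us_thousands_groups; infer_instance

-- ===== CLAIM (what is proved, stated in full; the proofs are below) =====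
def Claim_equal_collapse_us_thousands_groups : Prop := ∀ (parts : List String), Dom_collapse_us_thousands_groups parts → Spec_collapse_us_thousands_groups parts (collapse_us_thousands_groups parts)

-- ===== LEMMAS AND PROOFS =====

-- Invariant: with in_group=false B's fold appends A's groups after `out`;
-- with in_group=true and out[-1]=acc it continues A's inner absorption of acc.
lemma pvMain : ∀ (l : List String),
    (∀ out : List String, (l.foldl pvStepB (out, false)).1 = out ++ pvLoopA l) ∧
    (∀ (out : List String) (acc : String),
      (l.foldl pvStepB (out ++ [acc], true)).1
        = out ++ (pvInnerA acc l).1 :: pvLoopA (pvInnerA acc l).2) := by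
  intro l
  induction l with
  | nil => exact ⟨fun out => by simp [pvLoopA], fun out acc => by simp [pvLoopA, pvInnerA]⟩
  | cons p tl ih =>
    constructor
    · intro out
      by_cases hd : PySem.Chars.strIsdigit p.toList = true
      · rw [List.foldl_cons,
          show pvStepB (out, false) p = (out ++ [p], true) from by simp [pvStepB, hd],
          ih.2 out p]
        conv_rhs => rw [pvLoopA]
        simp [hd]
      · rw [List.foldl_cons,
          show pvStepB (out, false) p = (out ++ [p], false) from by simp [pvStepB, hd],
          ih.1 (out ++ [p])]
        conv_rhs => rw [pvLoopA]
        simp [hd]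
    · intro out acc
      by_cases hd : PySem.Chars.strIsdigit p.toList = true
      · by_cases h3 : (p.length : Int) = 3
        · rw [List.foldl_cons,
            show pvStepB (out ++ [acc], true) p = (out ++ [acc ++ p], true) from by
              simp [pvStepB, hd, h3],
            ih.2 out (acc ++ p)]
          have : pvInnerA acc (p :: tl) = pvInnerA (acc ++ p) tl := by
            rw [pvInnerA]
            simp [hd, h3]
          rw [this]
        · rw [List.foldl_cons,
            show pvStepB (out ++ [acc], true) p = ((out ++ [acc]) ++ [p], true) from by
              simp [pvStepB, hd, h3],
            ih.2 (out ++ [acc]) p]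
          have : pvInnerA acc (p :: tl) = (acc, p :: tl) := by
            rw [pvInnerA]
            simp [h3]
          rw [this]
          conv_rhs => rw [pvLoopA]
          simp [hd]
      · rw [List.foldl_cons,
          show pvStepB (out ++ [acc], true) p = ((out ++ [acc]) ++ [p], false) from by
            simp [pvStepB, hd],
          ih.1 ((out ++ [acc]) ++ [p])]
        have : pvInnerA acc (p :: tl) = (acc, p :: tl) := by
          rw [pvInnerA]
          simp [hd]
        rw [this]
        conv_rhs => rw [pvLoopA]
        simp [hd]

-- ===== VERDICT (by name: the statement is the Claim_ definition above) =====
theorem collapse_us_thousands_groups_spec : Claim_equal_collapse_us_thousands_groups := by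
  intro parts _
  unfold Spec_collapse_us_thousands_groups collapse_us_thousands_groups collapse_us_thousands_groups_alt
  rcases parts with _ | ⟨p, tl⟩
  · simp
  · simp only [if_neg (List.cons_ne_nil p tl)]
    rw [(pvMain (p :: tl)).1 []]
    simp
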